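-- pv_equiv track=rewrite | github.com/Hedy-dev/DataCompression | zle.py | zle_encode
-- ===== SOURCE A (Python) =====
-- def zle_encode(data):
--     result = []
--     i = 0
--     while i < len(data):
--         if data[i] != 0:
--             if data[i] in [254, 255]:
--                 result.extend([0, data[i]])  # Экранируем 254 и 255
--             else:
--                 result.append(data[i])
--             i += 1
--         else:
--             # Подсчет длины последовательности нулей
--             zero_count = 0
--             while i < len(data) and data[i] == 0:
--                 zero_count += 1
--                 i += 1
--
--             # Кодируем число zero_count + 1 в двоичном виде (без первой 1)
--             binary = bin(zero_count + 1)[3:]  # Пропускаем первую 1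
--             for b in binary:
--                 result.append(254 if b == '0' else 255)
--     return result
-- ===== SOURCE B (Python) =====
-- def _zeros_code(z):
--     # code for a run of z zeros: binary of z+1 without its leading 1, 0->254, 1->255
--     n = z + 1
--     return [254 + ((n >> k) & 1) for k in reversed(range(n.bit_length() - 1))]
--
-- def zle_encode(data):
--     out = []
--     start = 0
--     for i in (j for j, x in enumerate(data) if x != 0):
--         out += _zeros_code(i - start)
--         x = data[i]
--         out += [0, x] if x in (254, 255) else [x]
--         start = i + 1
--     out += _zeros_code(len(data) - start)
--     return out
-- ===== Notes on version B (the rewrite author's own statement) =====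
-- stated objective: alternative
-- what changed: Instead of A's index-based while-loop that scans and counts zero runs in place and slices bin(), B first builds the list of nonzero positions with enumerate, derives each zero-run length arithmetically as the gap between consecutive nonzero positions (and to the end), and emits each run's code by extracting bits from the run length via bit_length and shifts.
import Mathlib
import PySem

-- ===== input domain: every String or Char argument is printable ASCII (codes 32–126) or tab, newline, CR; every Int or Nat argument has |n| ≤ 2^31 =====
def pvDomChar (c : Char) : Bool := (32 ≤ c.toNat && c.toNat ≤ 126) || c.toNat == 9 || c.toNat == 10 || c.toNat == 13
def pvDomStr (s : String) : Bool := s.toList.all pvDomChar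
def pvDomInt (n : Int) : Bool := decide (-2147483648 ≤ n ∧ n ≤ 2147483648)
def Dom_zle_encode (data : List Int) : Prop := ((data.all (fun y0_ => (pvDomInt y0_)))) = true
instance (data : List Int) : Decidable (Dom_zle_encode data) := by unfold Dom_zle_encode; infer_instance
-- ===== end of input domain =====

-- B replaces A's in-place run-scanning loop by gap arithmetic on the list of nonzero
-- positions (built once with enumerate), with bit-shift extraction of each run code;
-- alternative decomposition, same cost.

-- ===== PORT A =====
-- inner 'while data[i] == 0' loop: counts the leading zeros and returns the rest
def zleCountZeros : List Int → Nat × List Int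
  | [] => (0, [])
  | x :: xs => if x = 0 then ((zleCountZeros xs).1 + 1, (zleCountZeros xs).2) else (0, x :: xs)

theorem zleCountZeros_len (l : List Int) : (zleCountZeros l).2.length ≤ l.length := by
  induction l with
  | nil => simp [zleCountZeros]
  | cons x xs ih =>
    by_cases h : x = 0 <;> simp [zleCountZeros, h]
    omega

-- bin(n)[3:] mapped through {'0' ↦ 254, '1' ↦ 255}: binary digits of n below the leading 1, msb first
def zleBinA (n : Nat) : List Int :=
  if n < 2 then [] else zleBinA (n / 2) ++ [if n % 2 = 1 then 255 else 254]
decreasing_by exact Nat.div_lt_self (by omega) (by omega)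

-- A's outer while loop, as structural recursion on the remaining suffix of data
def zle_encode (data : List Int) : List Int :=
  match data with
  | [] => []
  | x :: xs =>
    if x ≠ 0 then
      (if x = 254 ∨ x = 255 then [0, x] else [x]) ++ zle_encode xs
    else
      -- zero_count = 1 + zeros counted in xs
      zleBinA ((zleCountZeros xs).1 + 2) ++ zle_encode (zleCountZeros xs).2
termination_by data.length
decreasing_by
  · simp
  · have := zleCountZeros_len xs; simp; omega

-- ===== PORT B =====
-- n.bit_length() for n ≥ 0 (B only calls it on positive n)
def pyBitLength (n : Nat) : Nat :=
  if n = 0 then 0 else pyBitLength (n / 2) + 1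
decreasing_by exact Nat.div_lt_self (by omega) (by omega)

-- _zeros_code: [254 + ((n >> k) & 1) for k in reversed(range(n.bit_length() - 1))], n = z + 1
-- (z is always a nonnegative gap; n >> k = n / 2^k and & 1 = % 2, exact for nonnegative ints)
def zleZerosCode (z : Int) : List Int :=
  ((List.range (pyBitLength (z + 1).toNat - 1)).reverse).map
    (fun k => 254 + (((z + 1) / 2 ^ k) % 2))

-- B's for-loop over the nonzero positions, keeping (out, start); then the final tail code
def zle_encode_alt (data : List Int) : List Int :=
  let nz := (PySem.List.enumerate data).filterMap (fun p => if p.2 ≠ 0 then some p.1 else none)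
  let s := nz.foldl
    (fun (s : List Int × Int) i =>
      let x := PySem.List.pyGetD data i 0
      (s.1 ++ zleZerosCode (i - s.2) ++ (if x = 254 ∨ x = 255 then [0, x] else [x]), i + 1))
    ([], 0)
  s.1 ++ zleZerosCode ((data.length : Int) - s.2)

-- ===== PRECONDITION & SPEC =====
def Spec_zle_encode (data : List Int) (out : List Int) : Prop := out = zle_encode_alt data
instance (data : List Int) (out : List Int) : Decidable (Spec_zle_encode data out) := by unfold Spec_zle_encode; infer_instance

-- ===== CLAIM (what is proved, stated in full; the proofs are below) =====
def Claim_equal_zle_encode : Prop := ∀ (data : List Int), Dom_zle_encode data → Spec_zle_encode data (zle_encode data)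

-- ===== LEMMAS AND PROOFS =====

-- zleBinA n lists the bits of n below the leading one, msb first, via shifts
theorem zleBinA_bits (n : Nat) :
    zleBinA n = ((List.range (pyBitLength n - 1)).reverse).map
      (fun k => (254 + ((n / 2 ^ k) % 2 : Nat) : Int)) := by
  induction n using Nat.strong_induction_on with
  | _ n ih =>
    by_cases h : n < 2
    · interval_cases n <;> rw [zleBinA, pyBitLength] <;> simp [pyBitLength]
    · have hbl : pyBitLength n = pyBitLength (n / 2) + 1 := by
        rw [pyBitLength, if_neg (by omega : ¬ n = 0)]
      have hm : 1 ≤ pyBitLength (n / 2) := by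
        rw [pyBitLength, if_neg (by omega : ¬ n / 2 = 0)]; omega
      rw [zleBinA, if_neg h, ih (n / 2) (Nat.div_lt_self (by omega) (by omega)), hbl]
      rw [show pyBitLength (n / 2) + 1 - 1 = (pyBitLength (n / 2) - 1) + 1 by omega]
      rw [List.range_succ_eq_map, List.reverse_cons, List.map_append]
      congr 1
      · rw [List.map_reverse, List.map_reverse, List.map_map]
        congr 1
        apply List.map_congr_left
        intro k _
        have : n / 2 / 2 ^ k = n / 2 ^ (k + 1) := by
          rw [Nat.div_div_eq_div_mul, pow_succ, mul_comm]
        simp [this]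
      · simp only [List.map_cons, List.map_nil]
        congr 1
        rcases Nat.mod_two_eq_zero_or_one n with h2 | h2 <;> simp [h2, pow_zero, Nat.div_one]

-- zleZerosCode on a natural gap is exactly A's run code
theorem zleZerosCode_natCast (z : Nat) :
    zleZerosCode (z : Int) = zleBinA (z + 1) := by
  rw [zleZerosCode, zleBinA_bits]
  have h1 : ((z : Int) + 1).toNat = z + 1 := by omega
  rw [h1]
  apply List.map_congr_left
  intro k _
  have h2 : ((z : Int) + 1) / 2 ^ k % 2 = (((z + 1) / 2 ^ k % 2 : Nat) : Int) := by
    push_cast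
    rfl
  rw [h2]

theorem zleCountZeros_replicate (z : Nat) :
    zleCountZeros (List.replicate z 0) = (z, []) := by
  induction z with
  | zero => simp [zleCountZeros]
  | succ k ih => simp [List.replicate_succ, zleCountZeros, ih]

theorem zleCountZeros_replicate_append (z : Nat) (x : Int) (xs : List Int) (hx : x ≠ 0) :
    zleCountZeros (List.replicate z 0 ++ x :: xs) = (z, x :: xs) := by
  induction z with
  | zero => simp [zleCountZeros, hx]
  | succ k ih => simp [List.replicate_succ, zleCountZeros, ih]

-- every list splits as its leading zero run plus a rest that is empty or starts nonzero
theorem zleCountZeros_decomp (l : List Int) :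
    l = List.replicate (zleCountZeros l).1 0 ++ (zleCountZeros l).2 ∧
      ((zleCountZeros l).2 = [] ∨ ∃ x xs, (zleCountZeros l).2 = x :: xs ∧ x ≠ 0) := by
  induction l with
  | nil => simp [zleCountZeros]
  | cons x xs ih =>
    by_cases h : x = 0
    · subst h
      refine ⟨?_, by simpa [zleCountZeros] using ih.2⟩
      conv_lhs => rw [ih.1]
      simp [zleCountZeros, List.replicate_succ]
    · exact ⟨by simp [zleCountZeros, h], Or.inr ⟨x, xs, by simp [zleCountZeros, h], h⟩⟩

-- A on a pure zero block (z may be 0)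
theorem zle_encode_replicate (z : Nat) :
    zle_encode (List.replicate z 0) = zleBinA (z + 1) := by
  cases z with
  | zero => rw [zleBinA]; simp [zle_encode]
  | succ k =>
    rw [List.replicate_succ, zle_encode]
    simp [zleCountZeros_replicate, zle_encode]

-- A on a zero block followed by a nonzero byte
theorem zle_encode_replicate_cons (z : Nat) (x : Int) (xs : List Int) (hx : x ≠ 0) :
    zle_encode (List.replicate z 0 ++ x :: xs) =
      zleBinA (z + 1) ++ (if x = 254 ∨ x = 255 then [0, x] else [x]) ++ zle_encode xs := by
  cases z with
  | zero => rw [zleBinA]; simp [zle_encode, hx]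
  | succ k =>
    rw [List.replicate_succ, List.cons_append, zle_encode]
    simp [zleCountZeros_replicate_append k x xs hx, zle_encode, hx]

-- proof-side view of B's position list: indices (from k) of the nonzero entries
def zlePosFrom (k : Int) : List Int → List Int
  | [] => []
  | x :: xs => if x ≠ 0 then k :: zlePosFrom (k + 1) xs else zlePosFrom (k + 1) xs

theorem zle_filterMap_enumerate (l : List Int) (k : Int) :
    (PySem.List.enumerate l k).filterMap (fun p => if p.2 ≠ 0 then some p.1 else none) =
      zlePosFrom k l := by
  induction l generalizing k with
  | nil => simp [PySem.List.enumerate_nil, zlePosFrom]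
  | cons x xs ih =>
    rw [PySem.List.enumerate_cons, List.filterMap_cons, zlePosFrom, ih]
    by_cases h : x = 0 <;> simp [h]

theorem zlePosFrom_replicate (z : Nat) (k : Int) (rest : List Int) :
    zlePosFrom k (List.replicate z 0 ++ rest) = zlePosFrom (k + z) rest := by
  induction z generalizing k with
  | zero => simp
  | succ m ih =>
    rw [List.replicate_succ, List.cons_append, zlePosFrom, if_neg (by simp), ih]
    congr 1
    push_cast
    ring

-- looking up a position past a known prefix
theorem zle_pyGetD_at (pre : List Int) (x : Int) (xs : List Int) :
    PySem.List.pyGetD (pre ++ x :: xs) (pre.length : Int) 0 = x := by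
  rw [PySem.List.pyGetD_natCast]
  simp [List.getD]

-- B's position list on a nonzero head
theorem zlePosFrom_cons_ne (k x : Int) (xs : List Int) (hx : x ≠ 0) :
    zlePosFrom k (x :: xs) = k :: zlePosFrom (k + 1) xs := by
  simp [zlePosFrom, hx]

-- B's fold step, over a fixed data list
def zleStep (data : List Int) (s : List Int × Int) (i : Int) : List Int × Int :=
  let x := PySem.List.pyGetD data i 0
  (s.1 ++ zleZerosCode (i - s.2) ++ (if x = 254 ∨ x = 255 then [0, x] else [x]), i + 1)

-- main invariant: from state (out, |pre|) over the positions of the suffix ds,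
-- B finishes with out ++ A's encoding of ds
theorem zle_fold_inv (data : List Int) (ds pre out : List Int) (hpre : data = pre ++ ds) :
    ((zlePosFrom (pre.length : Int) ds).foldl (zleStep data) (out, (pre.length : Int))).1
        ++ zleZerosCode ((data.length : Int)
            - ((zlePosFrom (pre.length : Int) ds).foldl (zleStep data) (out, (pre.length : Int))).2)
      = out ++ zle_encode ds := by
  induction hn : ds.length using Nat.strong_induction_on generalizing ds pre out with
  | _ n ih =>
    obtain ⟨z, rest, hds, hrest⟩ : ∃ z rest, ds = List.replicate z 0 ++ rest ∧
        (rest = [] ∨ ∃ x xs, rest = x :: xs ∧ x ≠ 0) :=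
      ⟨_, _, (zleCountZeros_decomp ds).1, (zleCountZeros_decomp ds).2⟩
    subst hds
    rcases hrest with h0 | ⟨x, xs, hxxs, hx⟩
    · -- ds is a pure zero run
      subst h0
      rw [List.append_nil] at hpre
      rw [zlePosFrom_replicate]
      simp only [zlePosFrom, List.foldl_nil]
      have hlen : (data.length : Int) - (pre.length : Int) = (z : Int) := by
        rw [hpre]; simp
      rw [hlen, zleZerosCode_natCast, List.append_nil, zle_encode_replicate]
    · -- ds = zero run ++ x :: xs with x ≠ 0
      subst hxxs
      rw [zlePosFrom_replicate, zlePosFrom_cons_ne _ _ _ hx, List.foldl_cons]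
      have hstep : zleStep data (out, (pre.length : Int)) ((pre.length : Int) + (z : Int)) =
          (out ++ zleBinA (z + 1) ++ (if x = 254 ∨ x = 255 then [0, x] else [x]),
           ((pre ++ List.replicate z 0 ++ [x]).length : Int)) := by
        have hget : PySem.List.pyGetD data ((pre.length : Int) + (z : Int)) 0 = x := by
          have h1 : (pre.length : Int) + (z : Int) = (((pre ++ List.replicate z 0).length : Nat) : Int) := by
            simp
          rw [h1, hpre]
          rw [show pre ++ (List.replicate z 0 ++ x :: xs) = (pre ++ List.replicate z 0) ++ x :: xs by simp]
          exact zle_pyGetD_at _ x xs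
        have hgap : (pre.length : Int) + (z : Int) - (pre.length : Int) = (z : Int) := by ring
        simp only [zleStep, hget, hgap, zleZerosCode_natCast, Prod.mk.injEq]
        refine ⟨?_, ?_⟩
        · trivial
        · simp; ring
      rw [hstep]
      have hpre' : data = (pre ++ List.replicate z 0 ++ [x]) ++ xs := by
        rw [hpre]; simp
      have hpos : (pre.length : Int) + (z : Int) + 1 =
          (((pre ++ List.replicate z 0 ++ [x]).length : Nat) : Int) := by
        simp; ring
      rw [hpos]
      rw [ih xs.length (by rw [← hn]; simp; omega) xs _ _ hpre' rfl]
      rw [zle_encode_replicate_cons z x xs hx]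
      simp [List.append_assoc]

-- ===== VERDICT (by name: the statement is the Claim_ definition above) =====
theorem zle_encode_spec : Claim_equal_zle_encode := by
  intro data _
  unfold Spec_zle_encode zle_encode_alt
  rw [zle_filterMap_enumerate]
  have hfun : (fun (s : List Int × Int) i =>
      let x := PySem.List.pyGetD data i 0
      (s.1 ++ zleZerosCode (i - s.2) ++ (if x = 254 ∨ x = 255 then [0, x] else [x]), i + 1))
      = zleStep data := rfl
  rw [hfun]
  have h := zle_fold_inv data data [] [] (by simp)
  simp only [List.length_nil, Nat.cast_zero, List.nil_append] at h
  exact h.symm
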